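-- pv_equiv track=rewrite | github.com/ambdillah/kwezi-app | backend/cleanup_doublons_and_corrections.py | analyser_doublon
-- ===== SOURCE A (Python) =====
-- def analyser_doublon(mots):
--     """Analyse un groupe de doublons pour déterminer s'ils sont identiques ou différents"""
--     if len(mots) <= 1:
--         return "unique", None
--
--     # Comparer les traductions
--     premier_mot = mots[0]
--     traductions_identiques = True
--
--     for mot in mots[1:]:
--         if (mot.get('shimaore', '').strip() != premier_mot.get('shimaore', '').strip() or
--             mot.get('kibouchi', '').strip() != premier_mot.get('kibouchi', '').strip()):
--             traductions_identiques = False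
--             break
--
--     if traductions_identiques:
--         return "identiques", None
--     else:
--         return "differents", mots
-- ===== SOURCE B (Python) =====
-- def analyser_doublon(mots):
--     """Analyse un groupe de doublons pour déterminer s'ils sont identiques ou différents"""
--     if len(mots) <= 1:
--         return "unique", None
--     distinct = {(m.get('shimaore', '').strip(), m.get('kibouchi', '').strip()) for m in mots}
--     if len(distinct) == 1:
--         return "identiques", None
--     return "differents", mots
-- ===== Notes on version B (the rewrite author's own statement) =====
-- stated objective: idiomatic
-- what changed: Replaced the compare-to-first loop with a boolean flag and early break by building a set of the normalized (shimaore, kibouchi) pairs over the whole group and testing whether its cardinality is 1.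
import Mathlib
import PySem

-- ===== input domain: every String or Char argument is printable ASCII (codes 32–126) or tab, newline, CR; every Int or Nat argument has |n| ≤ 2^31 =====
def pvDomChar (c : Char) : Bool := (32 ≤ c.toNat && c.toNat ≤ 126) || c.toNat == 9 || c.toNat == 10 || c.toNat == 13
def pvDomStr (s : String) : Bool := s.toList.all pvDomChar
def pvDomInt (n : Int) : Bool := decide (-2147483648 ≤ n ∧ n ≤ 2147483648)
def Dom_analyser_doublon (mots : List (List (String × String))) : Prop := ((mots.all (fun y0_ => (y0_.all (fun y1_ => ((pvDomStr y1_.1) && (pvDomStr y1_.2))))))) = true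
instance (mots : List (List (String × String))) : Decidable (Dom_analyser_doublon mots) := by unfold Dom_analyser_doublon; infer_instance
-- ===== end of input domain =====

-- B replaces A's compare-to-first loop (flag + early break) with a set of normalized
-- translation pairs whose cardinality is tested; idiomatic, same cost.


-- ===== PORT A =====
-- mot.get('shimaore', '').strip()  (dict = association list, first-match lookup)
def pvShim (m : List (String × String)) : String :=
  PySem.Str.strip ((PySem.Dict.mk m).getD "shimaore" "")
def pvKib (m : List (String × String)) : String :=
  PySem.Str.strip ((PySem.Dict.mk m).getD "kibouchi" "")

-- the 'for mot in mots[1:]' loop with the flag and the break: returns the final flag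
def pvLoopA (premier : List (String × String)) :
    List (List (String × String)) → Bool
  | [] => true
  | mot :: rest =>
      if pvShim mot ≠ pvShim premier ∨ pvKib mot ≠ pvKib premier then false
      else pvLoopA premier rest

def analyser_doublon (mots : List (List (String × String))) :
    String × (Option (List (List (String × String)))) :=
  if mots.length ≤ 1 then ("unique", none)
  else
    let premier := PySem.List.pyGetD mots 0 []
    let traductions_identiques := pvLoopA premier (PySem.List.slice mots (some 1) none)
    if traductions_identiques then ("identiques", none)
    else ("differents", some mots)

-- ===== PORT B =====
-- the normalized translation tuple (m.get('shimaore','').strip(), m.get('kibouchi','').strip())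
def pvKey (m : List (String × String)) : String × String :=
  (PySem.Str.strip ((PySem.Dict.mk m).getD "shimaore" ""),
   PySem.Str.strip ((PySem.Dict.mk m).getD "kibouchi" ""))

def analyser_doublon_alt (mots : List (List (String × String))) :
    String × (Option (List (List (String × String)))) :=
  if mots.length ≤ 1 then ("unique", none)
  else
    let distinct : PySem.Set (String × String) := PySem.Set.ofList (mots.map pvKey)
    if PySem.Set.len distinct = 1 then ("identiques", none)
    else ("differents", some mots)

-- ===== PRECONDITION & SPEC =====
def Spec_analyser_doublon (mots : List (List (String × String))) (out : String × (Option (List (List (String × String))))) : Prop := out = analyser_doublon_alt mots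
instance (mots : List (List (String × String))) (out : String × (Option (List (List (String × String))))) : Decidable (Spec_analyser_doublon mots out) := by unfold Spec_analyser_doublon; infer_instance

-- ===== CLAIM (what is proved, stated in full; the proofs are below) =====
def Claim_equal_analyser_doublon : Prop := ∀ (mots : List (List (String × String))), Dom_analyser_doublon mots → Spec_analyser_doublon mots (analyser_doublon mots)

-- ===== LEMMAS AND PROOFS =====

-- A's loop flag says: every remaining word has the first word's normalized key
theorem pvLoopA_eq_true_iff (p : List (String × String))
    (l : List (List (String × String))) :
    pvLoopA p l = true ↔ ∀ m ∈ l, pvKey m = pvKey p := by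
  induction l with
  | nil => simp [pvLoopA]
  | cons m rest ih =>
      by_cases h : pvShim m ≠ pvShim p ∨ pvKib m ≠ pvKib p
      · simp only [pvLoopA, if_pos h]
        constructor
        · intro hfalse; cases hfalse
        · intro hall
          have := hall m (List.mem_cons_self ..)
          rcases h with h | h <;> simp [pvKey, Prod.ext_iff] at this ⊢ <;> tauto
      · simp only [pvLoopA, if_neg h, ih]
        push Not at h
        constructor
        · intro hall x hx
          rcases List.mem_cons.mp hx with rfl | hx
          · simp [pvKey, pvShim, pvKib] at h ⊢
            exact ⟨h.1, h.2⟩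
          · exact hall x hx
        · intro hall x hx; exact hall x (List.mem_cons_of_mem _ hx)

-- set(k :: l) has one element iff every element of l equals k
theorem ofList_cons_len_one_iff {α : Type} [BEq α] [LawfulBEq α]
    (k : α) (l : List α) :
    (PySem.Set.ofList (k :: l)).length = 1 ↔ ∀ x ∈ l, x = k := by
  rw [PySem.Set.ofList_cons]
  simp only [List.length_cons, Nat.add_eq_right, List.length_eq_zero_iff]
  constructor
  · intro hnil x hx
    by_contra hne
    have hmem : x ∈ PySem.Set.discard (PySem.Set.ofList l) k := by
      rw [PySem.Set.mem_discard]
      exact ⟨(PySem.Set.mem_ofList ..).mpr hx, hne⟩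
    rw [hnil] at hmem; cases hmem
  · intro hall
    rw [List.eq_nil_iff_forall_not_mem]
    intro x hx
    rw [PySem.Set.mem_discard, PySem.Set.mem_ofList] at hx
    exact hx.2 (hall x hx.1)

-- ===== VERDICT (by name: the statement is the Claim_ definition above) =====
theorem analyser_doublon_spec : Claim_equal_analyser_doublon := by
  intro mots _
  unfold Spec_analyser_doublon analyser_doublon analyser_doublon_alt
  by_cases hlen : mots.length ≤ 1
  · simp [hlen]
  · simp only [if_neg hlen]
    match mots, hlen with
    | p :: rest, _ =>
      have hget : PySem.List.pyGetD (p :: rest) 0 [] = p := by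
        simp [PySem.List.pyGetD, PySem.List.pyGet?, PySem.List.pyIdx?]
      have hslice : PySem.List.slice (p :: rest) (some 1) none = rest :=
        PySem.List.slice_from_one _
      rw [hget, hslice, PySem.Set.len]
      simp only [Nat.cast_eq_one, List.map_cons]
      by_cases hall : ∀ m ∈ rest, pvKey m = pvKey p
      · rw [if_pos ((pvLoopA_eq_true_iff p rest).mpr hall),
            if_pos (((ofList_cons_len_one_iff (pvKey p) (rest.map pvKey)).mpr
              (by intro x hx; rcases List.mem_map.mp hx with ⟨m, hm, rfl⟩; exact hall m hm)))]
      · rw [if_neg (by simpa [pvLoopA_eq_true_iff] using hall),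
            if_neg (by
              rw [ofList_cons_len_one_iff]
              intro h; apply hall
              intro m hm; exact h (pvKey m) (List.mem_map_of_mem hm))]
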